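-- pv_equiv track=rewrite | github.com/RRFSx/rrfs_lint | rrfs_lint.py | _find_header_lines
-- ===== SOURCE A (Python) =====
-- def _find_header_lines(lines: list[str], expected: list[str]) -> list[tuple[int, str, str]]:
--     """Match expected header lines against file lines, skipping comment/blank
--     lines between the shebang and the rest of the header.
--
--     Returns a list of (0-based line index, actual text, expected text) for each
--     expected header entry.  The shebang (expected[0]) is always checked at
--     line 0.  Subsequent expected lines are matched against the first
--     non-comment, non-blank lines after the shebang.
--     """
--     results: list[tuple[int, str, str]] = []
--     # First entry is always the shebang at line 0
--     actual0 = lines[0].rstrip() if lines else ""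
--     results.append((0, actual0, expected[0]))
--
--     # For the remaining expected lines, skip over comment / blank lines
--     exp_idx = 1
--     for file_idx in range(1, len(lines)):
--         if exp_idx >= len(expected):
--             break
--         stripped = lines[file_idx].strip()
--         if stripped == "" or stripped.startswith("#"):
--             continue  # skip comments and blanks between header lines
--         results.append((file_idx, lines[file_idx].rstrip(), expected[exp_idx]))
--         exp_idx += 1
--
--     # If we ran out of file lines before matching all expected entries
--     while exp_idx < len(expected):
--         results.append((len(lines), "", expected[exp_idx]))
--         exp_idx += 1
--
--     return results
-- ===== SOURCE B (Python) =====
-- def _find_header_lines(lines: list[str], expected: list[str]) -> list[tuple[int, str, str]]: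
--     # Demand-driven: iterate over the expected entries, advancing a cursor with a
--     # next-candidate search; pad inline once the cursor reaches end of file.
--     n = len(lines)
--
--     def next_cand(pos: int) -> int:
--         # index of the next non-blank, non-comment line at or after pos, else n
--         while pos < n:
--             s = lines[pos].strip()
--             if s and not s.startswith("#"):
--                 return pos
--             pos += 1
--         return n
--
--     out = [(0, lines[0].rstrip() if lines else "", expected[0])]
--     pos = 1
--     for exp in expected[1:]:
--         pos = next_cand(pos)
--         if pos < n:
--             out.append((pos, lines[pos].rstrip(), exp))
--             pos += 1
--         else:
--             out.append((n, "", exp))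
--     return out
-- ===== Notes on version B (the rewrite author's own statement) =====
-- stated objective: alternative
-- what changed: A drives one scan over the file lines, advancing an expected-index counter and padding missing entries in a trailing while loop; B is demand-driven: it iterates over the expected entries and for each one advances a cursor via a next-candidate search over the file, padding inline when the cursor hits end of file.
import Mathlib
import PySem

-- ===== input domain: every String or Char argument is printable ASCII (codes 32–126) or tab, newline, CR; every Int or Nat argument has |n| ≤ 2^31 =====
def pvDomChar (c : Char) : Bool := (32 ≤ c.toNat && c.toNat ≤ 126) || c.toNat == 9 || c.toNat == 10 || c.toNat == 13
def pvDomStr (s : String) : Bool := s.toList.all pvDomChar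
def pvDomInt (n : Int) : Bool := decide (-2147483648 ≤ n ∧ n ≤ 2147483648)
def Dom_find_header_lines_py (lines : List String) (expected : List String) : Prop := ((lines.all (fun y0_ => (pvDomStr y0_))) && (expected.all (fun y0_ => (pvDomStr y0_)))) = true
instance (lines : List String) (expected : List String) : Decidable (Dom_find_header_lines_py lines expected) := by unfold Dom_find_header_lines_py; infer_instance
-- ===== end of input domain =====

-- B replaces A's single line-driven scan (with expected counter and trailing pad loop)
-- by a demand-driven pass over the expected entries, each advancing a cursor via a
-- next-candidate search; same cost, different decomposition.

-- ===== PORT A =====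
-- the 'for file_idx in range(1, len(lines))' loop with its break / continue and exp_idx counter;
-- returns (emitted triples, final exp_idx)
def findA_loop (lines expected : List String) (idxs : List Nat) (exp_idx : Nat) :
    List (Int × String × String) × Nat :=
  match idxs with
  | [] => ([], exp_idx)
  | i :: rest =>
    if expected.length ≤ exp_idx then ([], exp_idx)   -- break
    else
      if PySem.Str.strip (lines.getD i "") = "" ∨
          PySem.Str.startswith (PySem.Str.strip (lines.getD i "")) "#" = true then
        findA_loop lines expected rest exp_idx        -- continue
      else
        let p := findA_loop lines expected rest (exp_idx + 1)
        (((i : Int), PySem.Str.rstrip (lines.getD i ""), expected.getD exp_idx "") :: p.1, p.2)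

def find_header_lines_py (lines : List String) (expected : List String) : List (Int × String × String) :=
  let actual0 := match lines with | [] => "" | l :: _ => PySem.Str.rstrip l
  let p := findA_loop lines expected (List.range' 1 (lines.length - 1)) 1
  (0, actual0, expected.getD 0 "") ::
    (p.1 ++ (expected.drop p.2).map (fun e => ((lines.length : Int), "", e)))   -- trailing while loop

-- ===== PORT B =====
-- B's inner 'next_cand' while loop: next non-blank non-comment index at or after pos, else n
def nextCand (lines : List String) (n pos : Nat) : Nat :=
  if _h : pos < n then
    if PySem.Str.strip (lines.getD pos "") ≠ "" ∧
        PySem.Str.startswith (PySem.Str.strip (lines.getD pos "")) "#" = false then pos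
    else nextCand lines n (pos + 1)
  else n
termination_by n - pos

-- B's 'for exp in expected[1:]' loop carrying the cursor
def findB_loop (lines : List String) (n : Nat) (pos : Nat) (rest : List String) :
    List (Int × String × String) :=
  match rest with
  | [] => []
  | e :: t =>
    let p := nextCand lines n pos
    if p < n then ((p : Int), PySem.Str.rstrip (lines.getD p ""), e) :: findB_loop lines n (p + 1) t
    else ((n : Int), "", e) :: findB_loop lines n p t

def find_header_lines_py_alt (lines : List String) (expected : List String) : List (Int × String × String) :=
  let n := lines.length
  let head := (0, (match lines with | [] => "" | l :: _ => PySem.Str.rstrip l), expected.getD 0 "")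
  head :: findB_loop lines n 1 (expected.drop 1)

-- ===== PRECONDITION & SPEC =====
-- Pre_ excludes only expected = [], on which A raises IndexError at expected[0]
def Pre_find_header_lines_py (lines : List String) (expected : List String) : Prop := expected ≠ []
instance (lines : List String) (expected : List String) : Decidable (Pre_find_header_lines_py lines expected) := by unfold Pre_find_header_lines_py; infer_instance
def pvWitness_find_header_lines_py : List String × List String := (["#!/bin/sh", "", "# c", "set -x"], ["#!/bin/sh", "set -x", "date"])

def Spec_find_header_lines_py (lines : List String) (expected : List String) (out : List (Int × String × String)) : Prop := out = find_header_lines_py_alt lines expected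
instance (lines : List String) (expected : List String) (out : List (Int × String × String)) : Decidable (Spec_find_header_lines_py lines expected out) := by unfold Spec_find_header_lines_py; infer_instance

-- ===== CLAIM (what is proved, stated in full; the proofs are below) =====
def Claim_equal_find_header_lines_py : Prop := ∀ (lines : List String) (expected : List String), Dom_find_header_lines_py lines expected → Pre_find_header_lines_py lines expected → Spec_find_header_lines_py lines expected (find_header_lines_py lines expected)

-- ===== LEMMAS AND PROOFS =====

-- proof-only: candidate view of one file line (some ⇔ it is a header candidate)
def candAt (lines : List String) (i : Nat) : Option (Int × String) :=
  if PySem.Str.strip (lines.getD i "") ≠ "" ∧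
      PySem.Str.startswith (PySem.Str.strip (lines.getD i "")) "#" = false then
    some ((i : Nat), PySem.Str.rstrip (lines.getD i ""))
  else none

-- common recursive shape both programs reduce to: zip candidates with rest, padding with (L, "")
def zipPad (cands : List (Int × String)) (rest : List String) (L : Int) : List (Int × String × String) :=
  match rest, cands with
  | [], _ => []
  | e :: rest', [] => (L, "", e) :: zipPad [] rest' L
  | e :: rest', c :: cands' => (c.1, c.2, e) :: zipPad cands' rest' L

theorem zipPad_nil_cands (rest : List String) (L : Int) :
    zipPad [] rest L = rest.map (fun e => (L, "", e)) := by
  induction rest with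
  | nil => rfl
  | cons e t ih => simp [zipPad, ih]

theorem a_loop_eq_zipPad (lines expected : List String) (idxs : List Nat) (k : Nat) :
    (findA_loop lines expected idxs k).1 ++
      (expected.drop (findA_loop lines expected idxs k).2).map
        (fun e => ((lines.length : Int), "", e)) =
    zipPad (idxs.filterMap (candAt lines)) (expected.drop k) (lines.length) := by
  induction idxs generalizing k with
  | nil => simp [findA_loop, zipPad_nil_cands]
  | cons i t ih =>
    simp only [findA_loop]
    by_cases hk : expected.length ≤ k
    · rw [if_pos hk, List.drop_eq_nil_of_le hk]; rfl
    · have hk' : k < expected.length := Nat.lt_of_not_le hk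
      have hdrop : expected.drop k = expected[k] :: expected.drop (k + 1) :=
        List.drop_eq_getElem_cons hk'
      have hget : expected.getD k "" = expected[k] := List.getD_eq_getElem _ _ hk'
      rw [if_neg hk]
      by_cases hc0 : PySem.Str.strip (lines.getD i "") = "" ∨
          PySem.Str.startswith (PySem.Str.strip (lines.getD i "")) "#" = true
      · have hf : candAt lines i = none := by
          unfold candAt
          apply if_neg
          rintro ⟨h1, h2⟩
          rcases hc0 with h | h
          · exact h1 h
          · rw [h] at h2; exact absurd h2 (by decide)
        rw [if_pos hc0, List.filterMap_cons_none hf]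
        exact ih k
      · have hc : PySem.Str.strip (lines.getD i "") ≠ "" ∧
            ¬ PySem.Str.startswith (PySem.Str.strip (lines.getD i "")) "#" = true := by
          constructor
          · intro h; exact hc0 (Or.inl h)
          · intro h; exact hc0 (Or.inr h)
        have hf : candAt lines i = some ((i : Int), PySem.Str.rstrip (lines.getD i "")) := by
          unfold candAt
          exact if_pos ⟨hc.1, Bool.eq_false_iff.mpr hc.2⟩
        rw [if_neg hc0, List.filterMap_cons_some hf, hdrop, hget]
        show _ :: _ = _ :: _
        exact congrArg _ (ih (k + 1))

-- nextCand characterises the head of the remaining candidate list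
theorem nextCand_filterMap (lines : List String) (n : Nat) :
    ∀ m pos, n - pos = m →
      (nextCand lines n pos < n →
        (List.range' pos (n - pos)).filterMap (candAt lines) =
          ((nextCand lines n pos : Int),
            PySem.Str.rstrip (lines.getD (nextCand lines n pos) "")) ::
            (List.range' (nextCand lines n pos + 1) (n - (nextCand lines n pos + 1))).filterMap
              (candAt lines)) ∧
      (¬ nextCand lines n pos < n →
        (List.range' pos (n - pos)).filterMap (candAt lines) = []) := by
  intro m
  induction m with
  | zero =>
    intro pos h0
    have hpn : ¬ pos < n := by omega
    have hnc : nextCand lines n pos = n := by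
      unfold nextCand; rw [dif_neg hpn]
    constructor
    · intro hlt; rw [hnc] at hlt; omega
    · intro _; rw [h0]; rfl
  | succ m ih =>
    intro pos hm
    have hpn : pos < n := by omega
    by_cases hc : PySem.Str.strip (lines.getD pos "") ≠ "" ∧
        PySem.Str.startswith (PySem.Str.strip (lines.getD pos "")) "#" = false
    · have hnc : nextCand lines n pos = pos := by
        unfold nextCand; rw [dif_pos hpn, if_pos hc]
      have hr : List.range' pos (n - pos) = pos :: List.range' (pos + 1) (n - (pos + 1)) := by
        have : n - pos = (n - (pos + 1)) + 1 := by omega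
        rw [this, List.range'_succ]
      have hf : candAt lines pos = some ((pos : Int), PySem.Str.rstrip (lines.getD pos "")) := by
        unfold candAt; exact if_pos hc
      constructor
      · intro _
        rw [hnc, hr, List.filterMap_cons_some hf]
      · intro hlt; rw [hnc] at hlt; omega
    · have hnc : nextCand lines n pos = nextCand lines n (pos + 1) := by
        conv_lhs => rw [nextCand]
        rw [dif_pos hpn, if_neg hc]
      have hf : candAt lines pos = none := by
        unfold candAt; exact if_neg hc
      have hr : List.range' pos (n - pos) = pos :: List.range' (pos + 1) (n - (pos + 1)) := by
        have : n - pos = (n - (pos + 1)) + 1 := by omega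
        rw [this, List.range'_succ]
      have ih' := ih (pos + 1) (by omega)
      constructor
      · intro hlt
        rw [hr, List.filterMap_cons_none hf, hnc]
        exact ih'.1 (hnc ▸ hlt)
      · intro hlt
        rw [hr, List.filterMap_cons_none hf]
        exact ih'.2 (fun h => hlt (hnc ▸ h))

theorem b_loop_eq_zipPad (lines : List String) (rest : List String) :
    ∀ pos, findB_loop lines lines.length pos rest =
      zipPad ((List.range' pos (lines.length - pos)).filterMap (candAt lines)) rest
        (lines.length) := by
  induction rest with
  | nil => intro pos; cases h : (List.range' pos (lines.length - pos)).filterMap (candAt lines) <;> rfl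
  | cons e t ih =>
    intro pos
    have hch := nextCand_filterMap lines lines.length (lines.length - pos) pos rfl
    by_cases hlt : nextCand lines lines.length pos < lines.length
    · rw [hch.1 hlt]
      show findB_loop lines lines.length pos (e :: t) = _
      unfold findB_loop
      rw [if_pos hlt]
      simp only [zipPad]
      exact congrArg _ (ih _)
    · rw [hch.2 hlt]
      show findB_loop lines lines.length pos (e :: t) = _
      unfold findB_loop
      rw [if_neg hlt]
      simp only [zipPad]
      refine congrArg _ ?_
      rw [ih (nextCand lines lines.length pos)]
      have : lines.length - nextCand lines lines.length pos = 0 := by omega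
      rw [this, List.range'_zero, List.filterMap_nil]

-- ===== VERDICT (by name: the statement is the Claim_ definition above) =====
theorem find_header_lines_py_spec : Claim_equal_find_header_lines_py := by
  intro lines expected _ _
  unfold Spec_find_header_lines_py find_header_lines_py find_header_lines_py_alt
  simp only
  rw [b_loop_eq_zipPad lines (expected.drop 1) 1, ← a_loop_eq_zipPad]
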